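-- pv_equiv track=rewrite | github.com/sa46lll/algorithm-interview | Examples/test.py | solution
-- ===== SOURCE A (Python) =====
-- def solution(p):
--     answer = [0] * len(p)
--     for idx, value in enumerate(p):
--         if value != min(p[idx:]):
--             min_val = min(p[idx:])
--             answer[idx] += 1
--             answer[p.index(min_val)] += 1
--             # 자리 바꿈
--             temp = p[p.index(min_val)]
--             p[p.index(min_val)] = p[idx]
--             p[idx] = temp
--             idx += 1
--         else:
--             idx += 1
--
--     return answer
-- ===== SOURCE B (Python) =====
-- def solution(p):
--     n = len(p)
--     s = sorted(p)
--     pos = {v: i for i, v in enumerate(p)}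
--     arr = list(p)
--     answer = [0] * n
--     for i in range(n):
--         v = s[i]
--         a = arr[i]
--         if a != v:
--             j = pos[v]
--             arr[i], arr[j] = v, a
--             pos[v], pos[a] = i, j
--             answer[i] += 1
--             answer[j] += 1
--     return answer
-- ===== Notes on version B (the rewrite author's own statement) =====
-- stated objective: faster
-- what changed: Instead of recomputing min(p[idx:]) and p.index(min_val) with inner scans at every step (O(n^2)), B sorts the list once to know each step's target value and keeps a value->position dict so every swap is found in O(1).
-- outside the precondition, e.g. on solution([2, 1, 1]): A returns [2, 2, 0], B returns [1, 0, 1]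
import Mathlib
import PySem

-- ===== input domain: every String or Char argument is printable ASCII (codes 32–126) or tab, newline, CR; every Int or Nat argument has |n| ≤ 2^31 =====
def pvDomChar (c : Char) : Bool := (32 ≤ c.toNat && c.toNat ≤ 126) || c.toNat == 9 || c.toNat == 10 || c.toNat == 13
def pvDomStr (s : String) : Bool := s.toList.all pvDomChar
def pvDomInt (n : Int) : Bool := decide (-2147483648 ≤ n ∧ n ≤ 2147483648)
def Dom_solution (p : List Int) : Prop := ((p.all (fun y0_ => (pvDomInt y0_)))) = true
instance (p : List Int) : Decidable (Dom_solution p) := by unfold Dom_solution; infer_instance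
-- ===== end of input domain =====

-- B replaces A's per-step min(p[idx:]) / p.index(...) inner scans by one initial sort plus a
-- value→position dict; A mutates its Python argument p in place, the ports are pure and the
-- equivalence proved here is about the RETURN value only.

-- ===== PORT A =====
-- literal port of A's loop: idx walks the (mutated) list, value = p[idx] at loop time,
-- min over the slice p[idx:], index of that min over the whole list, then the 3-line swap;
-- fuel = len(p) steps (the list length never changes), only a totality guard
def solutionGo (fuel : Nat) (p ans : List Int) (idx : Nat) : List Int :=
  match fuel with
  | 0 => ans
  | Nat.succ fuel =>
    if idx < p.length then
      let value := p.getD idx 0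
      let m := (PySem.List.min? (PySem.List.slice p (some (idx : Int)) none) (fun x => x)).getD 0
      if value ≠ m then
        let j := (PySem.List.index? p m).getD 0
        let ans1 := ans.set idx (ans.getD idx 0 + 1)
        let ans2 := ans1.set j (ans1.getD j 0 + 1)
        let temp := p.getD j 0
        let p1 := p.set j (p.getD idx 0)
        let p2 := p1.set idx temp
        solutionGo fuel p2 ans2 (idx + 1)
      else
        solutionGo fuel p ans (idx + 1)
    else ans

def solution (p : List Int) : List Int :=
  solutionGo p.length p (List.replicate p.length 0) 0

-- ===== PORT B =====
-- literal port of B: s = sorted(p), pos = {v: i for i, v in enumerate(p)}, arr = list(p),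
-- then one pass that swaps arr[i] with the dict-located position of the needed value
def solutionAltGo (fuel : Nat) (s q : List Int) (pos : PySem.Dict Int Int) (ans : List Int)
    (i : Nat) : List Int :=
  match fuel with
  | 0 => ans
  | Nat.succ fuel =>
    if i < q.length then
      let v := s.getD i 0
      let a := q.getD i 0
      if a ≠ v then
        let j := pos.getD v 0
        let q' := PySem.List.pySetD (q.set i v) j a
        let pos' := (pos.insert v (i : Int)).insert a j
        let ans1 := ans.set i (ans.getD i 0 + 1)
        let ans2 := PySem.List.pySetD ans1 j (PySem.List.pyGetD ans1 j 0 + 1)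
        solutionAltGo fuel s q' pos' ans2 (i + 1)
      else
        solutionAltGo fuel s q pos ans (i + 1)
    else ans

def solution_alt (p : List Int) : List Int :=
  solutionAltGo p.length (PySem.List.sorted p (fun x => x) false) p
    ((PySem.List.enumerate p 0).foldl (fun d iv => d.insert iv.2 iv.1) PySem.Dict.empty)
    (List.replicate p.length 0) 0

-- ===== PRECONDITION & SPEC =====
-- Pre_ excludes lists with duplicate values: there A's global p.index(min_val) may pick an
-- already-placed equal copy inside the sorted prefix, and which duplicate occurrence
-- participates in a swap is an accidental corner neither behaviour specifies.
def Pre_solution (p : List Int) : Prop := p.Nodup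
instance (p : List Int) : Decidable (Pre_solution p) := by unfold Pre_solution; infer_instance
def pvWitness_solution : List Int := [3, 1, 2]

def Spec_solution (p : List Int) (out : List Int) : Prop := out = solution_alt p
instance (p : List Int) (out : List Int) : Decidable (Spec_solution p out) := by
  unfold Spec_solution; infer_instance

-- ===== CLAIM (what is proved, stated in full; the proofs are below) =====
def Claim_equal_solution : Prop :=
  ∀ (p : List Int), Dom_solution p → Pre_solution p → Spec_solution p (solution p)

-- ===== LEMMAS AND PROOFS =====

theorem foldIns_not_mem (t : List Int) : ∀ (s : Int) (d : PySem.Dict Int Int) (x : Int),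
    x ∉ t →
    ((PySem.List.enumerate t s).foldl (fun d iv => d.insert iv.2 iv.1) d).getD x 0 = d.getD x 0 := by
  induction t with
  | nil => intro s d x _; simp [PySem.List.enumerate_nil]
  | cons a t ih =>
    intro s d x hx
    rw [PySem.List.enumerate_cons]
    simp only [List.foldl_cons]
    rw [ih (s+1) _ x (fun h => hx (List.mem_cons_of_mem _ h))]
    exact PySem.Dict.getD_insert_of_ne _ _ _ (fun h => hx (h ▸ List.mem_cons_self))


theorem foldIns_getD (t : List Int) : ∀ (s : Int) (d : PySem.Dict Int Int), t.Nodup →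
    ∀ (k : Nat) (hk : k < t.length),
    ((PySem.List.enumerate t s).foldl (fun d iv => d.insert iv.2 iv.1) d).getD (t[k]) 0
      = s + k := by
  induction t with
  | nil => intro s d _ k hk; simp at hk
  | cons a t ih =>
    intro s d hnd k hk
    rw [PySem.List.enumerate_cons]
    simp only [List.foldl_cons]
    rcases List.nodup_cons.mp hnd with ⟨ha, hndt⟩
    cases k with
    | zero =>
      simp only [List.getElem_cons_zero]
      rw [foldIns_not_mem t (s+1) _ a ha, PySem.Dict.getD_insert_self]
      simp
    | succ k =>
      simp only [List.getElem_cons_succ]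
      rw [ih (s+1) _ hndt k (by simpa using hk)]
      push_cast; ring


theorem cons_set_perm (t : List Int) (j : Nat) (hj : j < t.length) (x : Int) :
    ((t[j]'hj) :: t.set j x).Perm (x :: t) := by
  rw [List.set_eq_take_cons_drop x hj]
  conv_rhs => rw [show t = t.take j ++ t[j] :: t.drop (j+1) by
    rw [← List.drop_eq_getElem_cons hj, List.take_append_drop]]
  exact ((List.Perm.cons _ List.perm_middle).trans (List.Perm.swap _ _ _)).trans
    (List.Perm.cons _ List.perm_middle.symm)


theorem swap_perm : ∀ (i : Nat) (l : List Int) (j : Nat) (hij : i < j) (hj : j < l.length),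
    ((l.set i (l[j]'hj)).set j (l[i]'(Nat.lt_trans hij hj))).Perm l := by
  intro i
  induction i with
  | zero =>
    intro l j hij hj
    match l, j, hij with
    | a :: t, (j+1), _ =>
      simp only [List.getElem_cons_succ, List.getElem_cons_zero, List.set_cons_zero,
        List.set_cons_succ]
      exact cons_set_perm t j (by simpa using hj) a
  | succ i ih =>
    intro l j hij hj
    match l, j, hij with
    | a :: t, (j+1), _ =>
      simp only [List.getElem_cons_succ, List.set_cons_succ]
      exact List.Perm.cons a (ih t j (by omega) (by simpa using hj))


theorem drop_perm_of_prefix (p0 q : List Int) (i : Nat) (hq : q.Perm p0)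
    (hpre : q.take i = (PySem.List.sorted p0 (fun x => x) false).take i) :
    (q.drop i).Perm ((PySem.List.sorted p0 (fun x => x) false).drop i) := by
  set s := PySem.List.sorted p0 (fun x => x) false with hs
  have hqs : q.Perm s := hq.trans (PySem.List.sorted_perm p0 (fun x => x) false).symm
  have h : (q.take i ++ q.drop i).Perm (s.take i ++ s.drop i) := by
    rw [List.take_append_drop, List.take_append_drop]; exact hqs
  rw [hpre] at h
  exact (List.perm_append_left_iff _).mp h


theorem min_drop_eq (p0 q : List Int) (i : Nat) (hq : q.Perm p0)
    (hpre : q.take i = (PySem.List.sorted p0 (fun x => x) false).take i) (hi : i < q.length) :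
    PySem.List.min? (List.drop i q) (fun x => x)
      = some ((PySem.List.sorted p0 (fun x => x) false)[i]'(by
          rw [PySem.List.length_sorted, ← hq.length_eq]; exact hi)) := by
  set s := PySem.List.sorted p0 (fun x => x) false with hs
  have his : i < s.length := by rw [hs, PySem.List.length_sorted, ← hq.length_eq]; exact hi
  have hdp : (q.drop i).Perm (s.drop i) := drop_perm_of_prefix p0 q i hq hpre
  have hne : q.drop i ≠ [] := by
    intro h
    have := congrArg List.length h
    simp at this; omega
  obtain ⟨m, hm⟩ : ∃ m, PySem.List.min? (List.drop i q) (fun x => x) = some m := by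
    cases h : PySem.List.min? (List.drop i q) (fun x => x) with
    | none => exact absurd ((PySem.List.min?_eq_none_iff _ _).mp h) hne
    | some m => exact ⟨m, rfl⟩
  have hmem : m ∈ s.drop i := hdp.subset (PySem.List.min?_mem hm)
  have hdcons : s.drop i = s[i] :: s.drop (i+1) := List.drop_eq_getElem_cons his
  have hpw : List.Pairwise (fun a b : Int => a ≤ b) (s.drop i) :=
    List.Pairwise.sublist (List.drop_sublist i s) (PySem.List.sorted_pairwise p0 (fun x => x))
  have hle1 : s[i] ≤ m := by
    rw [hdcons] at hmem hpw
    rcases List.mem_cons.mp hmem with h | h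
    · exact le_of_eq h.symm
    · exact (List.pairwise_cons.mp hpw).1 m h
  have hle2 : m ≤ s[i] := by
    have : s[i] ∈ q.drop i := hdp.symm.subset (by rw [hdcons]; exact List.mem_cons_self)
    exact PySem.List.min?_isMin hm _ this
  rw [hm, le_antisymm hle2 hle1]


theorem swap_perm' (l : List Int) (i j : Nat) (hij : i < j) (hj : j < l.length) (x y : Int)
    (hx : l[j]'hj = x) (hy : l[i]'(Nat.lt_trans hij hj) = y) :
    ((l.set i x).set j y).Perm l := by
  subst hx; subst hy; exact swap_perm i l j hij hj


theorem take_succ_eq (q s : List Int) (i : Nat) (hi : i < q.length) (his : i < s.length)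
    (hpre : q.take i = s.take i) (hqi : q[i]'hi = s[i]'his) :
    q.take (i+1) = s.take (i+1) := by
  rw [List.take_add_one, List.take_add_one, hpre]
  congr 1
  rw [List.getElem?_eq_getElem hi, List.getElem?_eq_getElem his, hqi]


theorem go_eq (p0 : List Int) (h0 : p0.Nodup) :
    ∀ (fuel : Nat) (i : Nat) (q : List Int) (pos : PySem.Dict Int Int) (ans : List Int),
    q.Perm p0 →
    q.take i = (PySem.List.sorted p0 (fun x => x) false).take i →
    (∀ (k : Nat) (hk : k < q.length), pos.getD (q[k]'hk) 0 = (k : Int)) →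
    solutionGo fuel q ans i
      = solutionAltGo fuel (PySem.List.sorted p0 (fun x => x) false) q pos ans i := by
  intro fuel
  induction fuel with
  | zero => intro i q pos ans _ _ _; rfl
  | succ fuel ih =>
    intro i q pos ans hq hpre hpos
    set s := PySem.List.sorted p0 (fun x => x) false with hs
    by_cases hi : i < q.length
    · have his : i < s.length := by rw [hs, PySem.List.length_sorted, ← hq.length_eq]; exact hi
      have hnd : q.Nodup := hq.nodup_iff.mpr h0
      have hslen : s.length = q.length := by
        rw [hs, PySem.List.length_sorted, hq.length_eq]
      have hsnd : s.Nodup :=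
        ((PySem.List.sorted_perm p0 (fun x => x) false).nodup_iff).mpr h0
      have hmin : (PySem.List.min? (PySem.List.slice q (some (i:Int)) none) (fun x => x))
          = some (s[i]'his) := by
        rw [PySem.List.slice_from_natCast]; exact min_drop_eq p0 q i hq hpre hi
      have hval : q.getD i 0 = q[i]'hi := List.getD_eq_getElem q 0 hi
      have hvv : s.getD i 0 = s[i]'his := List.getD_eq_getElem s 0 his
      have hmem : (s[i]'his) ∈ q := by
        have h1 := PySem.List.min?_mem hmin
        rw [PySem.List.slice_from_natCast] at h1
        exact List.mem_of_mem_drop h1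
      obtain ⟨jv, hjv⟩ : ∃ jv, PySem.List.index? q (s[i]'his) = some jv := by
        cases h : PySem.List.index? q (s[i]'his) with
        | none =>
          have h2 := (PySem.List.index?_isSome_iff q _).mpr hmem
          rw [h] at h2; simp at h2
        | some jv => exact ⟨jv, rfl⟩
      obtain ⟨hjlt, hjval, _⟩ := PySem.List.getElem_of_index?_eq_some hjv
      have hposj : pos.getD (s[i]'his) 0 = (jv : Int) := by
        rw [← hjval]; exact hpos jv hjlt
      have hgd : q.getD jv 0 = s[i]'his := by rw [List.getD_eq_getElem q 0 hjlt, hjval]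
      rw [solutionGo, solutionAltGo]
      simp only [if_pos hi, hval, hvv, hmin, hjv, Option.getD_some, hposj, hgd,
        PySem.List.pySetD_natCast, PySem.List.pyGetD_natCast]
      by_cases hcond : q[i]'hi = s[i]'his
      · simp only [hcond, ne_eq, not_true_eq_false, reduceIte]
        exact ih (i+1) q pos ans hq (take_succ_eq q s i hi his hpre hcond) hpos
      · have hji : jv ≠ i := by
          intro h; subst h; exact hcond hjval
        have hij : i < jv := by
          rcases Nat.lt_trichotomy i jv with h | h | h
          · exact h
          · exact absurd h.symm hji
          · exfalso
            have h1 : q[jv]? = s[jv]? := by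
              have e := congrArg (fun l => l[jv]?) hpre
              simpa only [List.getElem?_take, if_pos h] using e
            have h2 : q[jv]'hjlt = s[jv]'(by omega) := by
              rw [List.getElem?_eq_getElem hjlt, List.getElem?_eq_getElem (by omega)] at h1
              exact Option.some.inj h1
            exact Nat.lt_irrefl i (hsnd.getElem_inj_iff.mp (h2 ▸ hjval) ▸ h)
        simp only [ne_eq, hcond, not_false_eq_true, reduceIte]
        have hlen2 : ((q.set i (s[i]'his)).set jv (q[i]'hi)).length = q.length := by simp
        -- A's state equals B's state
        rw [List.set_comm (q[i]'hi) (s[i]'his) hji]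
        apply ih (i+1)
        · exact swap_perm' q i jv hij hjlt _ _ hjval rfl |>.trans hq
        · apply take_succ_eq _ _ _ (by omega) (by omega)
          · rw [List.take_set, List.take_set,
              List.set_eq_of_length_le (by
                simp only [List.length_set, List.length_take]
                exact le_trans (Nat.min_le_left _ _) (by omega)),
              List.set_eq_of_length_le (by
                simp only [List.length_take]
                exact le_trans (Nat.min_le_left _ _) (by omega)), hpre]
          · simp [hji]
        · intro k hk
          have hk' : k < q.length := by simpa using hk
          by_cases hkj : k = jv
          · have he : ((q.set i (s[i]'his)).set jv (q[i]'hi))[k]'hk = q[i]'hi := by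
              subst hkj; simp
            rw [he, PySem.Dict.getD_insert_self, hkj]
          · by_cases hki : k = i
            · have he : ((q.set i (s[i]'his)).set jv (q[i]'hi))[k]'hk = s[i]'his := by
                subst hki; simp [hji]
              rw [he, PySem.Dict.getD_insert_of_ne _ _ _ (fun h => hcond h.symm),
                PySem.Dict.getD_insert_self, hki]
            · have he : ((q.set i (s[i]'his)).set jv (q[i]'hi))[k]'hk = q[k]'hk' := by
                simp [Ne.symm hkj, Ne.symm hki]
              rw [he, PySem.Dict.getD_insert_of_ne _ _ _
                  (fun h => hki (hnd.getElem_inj_iff.mp h)),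
                PySem.Dict.getD_insert_of_ne _ _ _
                  (fun h => hkj (hnd.getElem_inj_iff.mp (hjval ▸ h)))]
              exact hpos k hk'
    · rw [solutionGo, solutionAltGo]
      simp [if_neg hi]

-- ===== VERDICT (by name: the statement is the Claim_ definition above) =====
theorem solution_spec : Claim_equal_solution := by
  intro p _ hpre
  unfold Spec_solution solution solution_alt
  exact go_eq p hpre p.length 0 p _ _ (List.Perm.refl p) (by simp)
    (fun k hk => by simpa using foldIns_getD p 0 PySem.Dict.empty hpre k hk)
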